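-- pv_equiv track=rewrite | github.com/Russ741/2023-advent-of-code | 14/02.py | tilt_board
-- ===== SOURCE A (Python) =====
-- def tilt_board(board):
--     rows = len(board)
--     cols = len(board[0])
--
--     for col in range(cols):
--         empty_row = 0
--         for row in range(rows):
--             chr = board[row][col]
--             if chr == '#':
--                 empty_row = row + 1
--             elif chr == 'O':
--                 if empty_row < row:
--                     board[empty_row][col] = 'O'
--                     board[row][col] = '.'
--                 empty_row += 1
--     return board
-- ===== SOURCE B (Python) =====
-- # Segment-based re-implementation: per column, split on '#', count the 'O's in
-- # each segment and rewrite it as O's on top; same in-place mutation as A.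
-- def settle(seg):
--     m = sum(1 for ch in seg if ch == 'O')
--     return ['O'] * m + [ch if ch != 'O' else '.' for ch in seg[m:]]
--
-- def tilt_column(column):
--     out = []
--     seg = []
--     for ch in column:
--         if ch == '#':
--             out.extend(settle(seg))
--             out.append('#')
--             seg = []
--         else:
--             seg.append(ch)
--     return out + settle(seg)
--
-- def tilt_board(board):
--     cols = len(board[0])
--     for col in range(cols):
--         new = tilt_column([row[col] for row in board])
--         for row, v in zip(board, new):
--             row[col] = v
--     return board
-- ===== Notes on version B (the rewrite author's own statement) =====
-- stated objective: alternative
-- what changed: A rolls each rock up one at a time with a running empty_row pointer and two writes per moved rock; B decomposes each column into '#'-bounded segments, counts the 'O's per segment and rewrites the whole segment (O's on top, the rest with O's blanked) in one count-and-refill pass.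
import Mathlib
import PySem

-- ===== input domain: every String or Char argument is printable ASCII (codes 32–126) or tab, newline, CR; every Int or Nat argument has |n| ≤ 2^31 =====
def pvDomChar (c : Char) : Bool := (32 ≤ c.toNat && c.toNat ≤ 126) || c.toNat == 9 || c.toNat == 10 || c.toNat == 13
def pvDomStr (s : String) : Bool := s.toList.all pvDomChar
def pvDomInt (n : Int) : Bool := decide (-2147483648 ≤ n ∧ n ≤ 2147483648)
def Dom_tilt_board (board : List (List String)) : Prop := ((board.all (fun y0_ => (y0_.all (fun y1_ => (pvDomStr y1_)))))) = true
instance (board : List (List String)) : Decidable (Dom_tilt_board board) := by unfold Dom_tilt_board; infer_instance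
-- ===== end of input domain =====

-- B replaces A's per-rock rolling (running empty_row pointer) with a per-column
-- segment decomposition: split each column on '#', count the 'O's per segment and
-- rewrite the segment as O's on top.  Both mutate `board` in place in Python; the
-- equivalence proved here is about the returned value (which is that same board).

-- ===== PORT A =====
-- board[r][c] = v  (r, c are in range under Pre_)
def setCell (b : List (List String)) (r c : Nat) (v : String) : List (List String) :=
  b.set r ((b.getD r []).set c v)

-- one iteration of A's inner `for row in range(rows)` loop, state = (empty_row, board)
def stepA (col : Nat) (st : Nat × List (List String)) (row : Nat) : Nat × List (List String) :=
  let chr := (st.2.getD row []).getD col ""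
  if chr = "#" then (row + 1, st.2)
  else if chr = "O" then
    if st.1 < row then (st.1 + 1, setCell (setCell st.2 st.1 col "O") row col ".")
    else (st.1 + 1, st.2)
  else st

def tilt_board (board : List (List String)) : List (List String) :=
  let rows := board.length
  let cols := (board.headI).length   -- Python len(board[0]); board = [] raises, excluded by Pre_
  (List.range cols).foldl (fun b col =>
    ((List.range rows).foldl (stepA col) (0, b)).2) board

-- ===== PORT B =====
def settle (seg : List String) : List String :=
  let m := seg.count "O"
  List.replicate m "O" ++ (seg.drop m).map (fun ch => if ch = "O" then "." else ch)

-- one iteration of tilt_column's loop, state = (out, seg)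
def stepB (st : List String × List String) (ch : String) : List String × List String :=
  if ch = "#" then (st.1 ++ settle st.2 ++ ["#"], [])
  else (st.1, st.2 ++ [ch])

def tilt_column (column : List String) : List String :=
  let p := column.foldl stepB ([], [])
  p.1 ++ settle p.2

def tilt_board_alt (board : List (List String)) : List (List String) :=
  let cols := (board.headI).length
  (List.range cols).foldl (fun b col =>
    List.zipWith (fun row v => row.set col v)
      b (tilt_column (b.map (fun row => row.getD col "")))) board

-- ===== PRECONDITION & SPEC =====
-- Pre_ = exactly the inputs on which Python A returns: a nonempty board whose every
-- row has at least len(board[0]) cells (otherwise board[0] / board[row][col] raises IndexError).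
def Pre_tilt_board (board : List (List String)) : Prop :=
  board ≠ [] ∧ ∀ row ∈ board, (board.headI).length ≤ row.length
instance (board : List (List String)) : Decidable (Pre_tilt_board board) := by
  unfold Pre_tilt_board; infer_instance

def pvWitness_tilt_board : List (List String) :=
  [[".", "O"], ["O", "#"], ["O", "O"]]

def Spec_tilt_board (board : List (List String)) (out : List (List String)) : Prop := out = tilt_board_alt board
instance (board : List (List String)) (out : List (List String)) : Decidable (Spec_tilt_board board out) := by unfold Spec_tilt_board; infer_instance

-- ===== CLAIM (what is proved, stated in full; the proofs are below) =====
def Claim_equal_tilt_board : Prop := ∀ (board : List (List String)), Dom_tilt_board board → Pre_tilt_board board → Spec_tilt_board board (tilt_board board)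

-- ===== LEMMAS AND PROOFS =====

-- 1-D version of A's inner loop, acting on a single column (proof device)
def stepA1 (st : Nat × List String) (row : Nat) : Nat × List String :=
  let chr := st.2.getD row ""
  if chr = "#" then (row + 1, st.2)
  else if chr = "O" then
    if st.1 < row then (st.1 + 1, (st.2.set st.1 "O").set row ".")
    else (st.1 + 1, st.2)
  else st

lemma settle_eq (s : List String) :
    settle s = List.replicate (s.count "O") "O"
      ++ (s.drop (s.count "O")).map (fun ch => if ch = "O" then "." else ch) := rfl

lemma settle_length (s : List String) : (settle s).length = s.length := by
  have h := List.count_le_length (l := s) (a := "O")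
  simp [settle]; omega

lemma set_at_append {α : Type} (xs : List α) (y : α) (ys : List α) (v : α) :
    (xs ++ y :: ys).set xs.length v = xs ++ v :: ys := by
  induction xs with
  | nil => simp
  | cons a t ih => simp [ih]

lemma getD_at_append {α : Type} (xs : List α) (y : α) (ys : List α) (d : α) :
    (xs ++ y :: ys).getD xs.length d = y := by
  induction xs with
  | nil => simp
  | cons a t ih => simpa using ih

-- the main column invariant: after k steps A's 1-D loop state is exactly
-- (|out| + count "O" seg, out ++ settle seg ++ rest) where (out, seg) is B's
-- fold state over the first k cells of the column
lemma invA1 (orig : List String) : ∀ (k : Nat), k ≤ orig.length →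
    (((orig.take k).foldl stepB ([], [])).1.length
        + ((orig.take k).foldl stepB ([], [])).2.length = k)
  ∧ (List.range k).foldl stepA1 (0, orig) =
      (((orig.take k).foldl stepB ([], [])).1.length
          + ((orig.take k).foldl stepB ([], [])).2.count "O",
       ((orig.take k).foldl stepB ([], [])).1
          ++ settle ((orig.take k).foldl stepB ([], [])).2 ++ orig.drop k) := by
  intro k
  induction k with
  | zero => intro _; simp [settle]
  | succ k ih =>
    intro hk
    have hklt : k < orig.length := hk
    obtain ⟨ihlen, ihfold⟩ := ih (Nat.le_of_succ_le hk)
    set p := (orig.take k).foldl stepB ([], []) with hp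
    have htake : orig.take (k+1) = orig.take k ++ [orig[k]] := by
      rw [List.take_succ, List.getElem?_eq_getElem hklt]; rfl
    have htake2 : (orig.take (k+1)).foldl stepB ([], []) = stepB p (orig[k]) := by
      rw [htake, List.foldl_append]; rfl
    have hrange : (List.range (k+1)).foldl stepA1 (0, orig)
        = stepA1 ((List.range k).foldl stepA1 (0, orig)) k := by
      rw [List.range_succ]; simp
    have hdrop : orig.drop k = orig[k] :: orig.drop (k+1) := List.drop_eq_getElem_cons hklt
    have hslen : (p.1 ++ settle p.2).length = k := by
      simp [settle_length]; omega
    have hread : (p.1 ++ settle p.2 ++ orig.drop k).getD k "" = orig[k] := by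
      have h0 := getD_at_append (p.1 ++ settle p.2) (orig[k]'hklt) (orig.drop (k+1)) ""
      rw [hslen] at h0
      rw [hdrop]
      exact h0
    have hm : p.2.count "O" ≤ p.2.length := List.count_le_length
    rw [htake2, hrange, ihfold]
    unfold stepA1 stepB
    simp only []
    rw [hread]
    by_cases h1 : orig[k] = "#"
    · rw [if_pos h1, if_pos h1]
      refine ⟨by simp [settle_length]; omega, ?_⟩
      refine Prod.ext ?_ ?_
      · simp [settle_length]; omega
      · simp [settle, hdrop, h1]
    · by_cases h2 : orig[k] = "O"
      · rw [if_neg h1, if_neg h1, if_pos h2]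
        rcases Nat.lt_or_ge (p.2.count "O") p.2.length with hlt | hge
        · -- a rock rolls up: er = |out| + m < k
          have her : p.1.length + p.2.count "O" < k := by omega
          rw [if_pos her]
          refine ⟨by simp; omega, ?_⟩
          refine Prod.ext ?_ ?_
          · simp [List.count_append, h2]; omega
          · -- the two writes turn the open segment into settle (seg ++ ["O"])
            simp only []
            set m := p.2.count "O" with hmdef
            have hdm : p.2.drop m = p.2[m] :: p.2.drop (m+1) := List.drop_eq_getElem_cons hlt
            have hsp : settle p.2
                = List.replicate m "O"
                  ++ (if p.2[m] = "O" then "." else p.2[m])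
                    :: (p.2.drop (m+1)).map (fun ch => if ch = "O" then "." else ch) := by
              rw [settle_eq, ← hmdef, hdm]
              simp only [List.map_cons]
            have e1 : p.1 ++ settle p.2 ++ orig.drop k
                = (p.1 ++ List.replicate m "O")
                  ++ ((if p.2[m] = "O" then "." else p.2[m])
                      :: ((p.2.drop (m+1)).map (fun ch => if ch = "O" then "." else ch)
                          ++ orig[k] :: orig.drop (k+1))) := by
              rw [hdrop, hsp]; simp
            have e2 : (p.1 ++ List.replicate m "O").length = p.1.length + m := by simp
            have e2' := set_at_append (p.1 ++ List.replicate m "O")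
                (if p.2[m] = "O" then "." else p.2[m])
                ((p.2.drop (m+1)).map (fun ch => if ch = "O" then "." else ch)
                    ++ orig[k] :: orig.drop (k+1)) "O"
            rw [e2] at e2'
            rw [e1, e2']
            have e3 : (p.1 ++ List.replicate m "O")
                  ++ ("O" :: ((p.2.drop (m+1)).map (fun ch => if ch = "O" then "." else ch)
                      ++ orig[k] :: orig.drop (k+1)))
                = ((p.1 ++ List.replicate m "O")
                    ++ "O" :: (p.2.drop (m+1)).map (fun ch => if ch = "O" then "." else ch))
                  ++ orig[k] :: orig.drop (k+1) := by simp
            have e4 : ((p.1 ++ List.replicate m "O")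
                    ++ "O" :: (p.2.drop (m+1)).map (fun ch => if ch = "O" then "." else ch)).length
                = k := by simp; omega
            have e4' := set_at_append ((p.1 ++ List.replicate m "O")
                    ++ "O" :: (p.2.drop (m+1)).map (fun ch => if ch = "O" then "." else ch))
                (orig[k]'hklt) (orig.drop (k+1)) "."
            rw [e4] at e4'
            rw [e3, e4', h2]
            have e5 : settle (p.2 ++ ["O"])
                = List.replicate m "O"
                  ++ "O" :: ((p.2.drop (m+1)).map (fun ch => if ch = "O" then "." else ch)
                      ++ ["."]) := by
              have hc : (p.2 ++ ["O"]).count "O" = m + 1 := by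
                simp [List.count_append, ← hmdef]
              have hd : (p.2 ++ ["O"]).drop (m+1) = p.2.drop (m+1) ++ ["O"] :=
                List.drop_append_of_le_length hlt
              simp [settle, hc, hd, List.replicate_succ']
            rw [e5]; simp
        · -- the rock is already in place: er = k
          have heq : p.2.count "O" = p.2.length := le_antisymm hm hge
          have her : ¬ p.1.length + p.2.count "O" < k := by omega
          rw [if_neg her]
          refine ⟨by simp; omega, ?_⟩
          refine Prod.ext ?_ ?_
          · simp [List.count_append, h2]; omega
          · simp only []
            have hs1 : settle p.2 = List.replicate p.2.length "O" := by
              simp [settle, heq]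
            have hs2 : settle (p.2 ++ ["O"]) = List.replicate (p.2.length + 1) "O" := by
              have hc : (p.2 ++ ["O"]).count "O" = p.2.length + 1 := by
                simp [List.count_append, heq]
              simp [settle, hc]
            rw [hdrop, h2, hs1, hs2, List.replicate_succ']
            simp
      · -- an inert cell: nothing moves, the cell joins the open segment unchanged
        rw [if_neg h1, if_neg h1, if_neg h2]
        have hcnt : (p.2 ++ [orig[k]]).count "O" = p.2.count "O" := by
          rw [List.count_append]
          simp [List.count_singleton]
          intro hcontr
          exact h2 hcontr
        refine ⟨by simp; omega, ?_⟩
        refine Prod.ext ?_ ?_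
        · simp [hcnt]
        · simp only []
          have hs : settle (p.2 ++ [orig[k]]) = settle p.2 ++ [orig[k]] := by
            have hd : (p.2 ++ [orig[k]]).drop (p.2.count "O")
                = p.2.drop (p.2.count "O") ++ [orig[k]] :=
              List.drop_append_of_le_length hm
            simp [settle, hcnt, hd, h2]
          rw [hs, hdrop]; simp

lemma tilt_column_eq (orig : List String) :
    ((List.range orig.length).foldl stepA1 (0, orig)).2 = tilt_column orig := by
  have h := (invA1 orig orig.length le_rfl).2
  simp only [List.take_length, List.drop_length] at h
  simp [h, tilt_column]

lemma tilt_column_length (s : List String) : (tilt_column s).length = s.length := by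
  have h := (invA1 s s.length le_rfl).1
  simp only [List.take_length] at h
  simp [tilt_column, settle_length]; omega

lemma stepA1_length (st : Nat × List String) (r : Nat) :
    ((stepA1 st r).2).length = st.2.length := by
  unfold stepA1
  by_cases h1 : st.2[r]?.getD "" = "#"
  · simp [h1]
  · by_cases h2 : st.2[r]?.getD "" = "O"
    · by_cases h3 : st.1 < r
      · simp [h1, h2, h3]
      · simp [h1, h2, h3]
    · simp [h1, h2]

lemma foldl_stepA1_length (l : List Nat) (st : Nat × List String) :
    ((l.foldl stepA1 st).2).length = st.2.length := by
  induction l generalizing st with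
  | nil => rfl
  | cons a t ih => simp [List.foldl, ih, stepA1_length]

lemma zipWith_set_right {α β γ : Type} (f : α → β → γ) :
    ∀ (b : List α) (c : List β) (r : Nat) (h1 : r < b.length), r < c.length → ∀ (v : β),
    (List.zipWith f b c).set r (f (b[r]'h1) v) = List.zipWith f b (c.set r v) := by
  intro b
  induction b with
  | nil => intro c r h; exact absurd h (by simp)
  | cons x xs ih =>
    intro c r h1 h2 v
    cases c with
    | nil => simp at h2
    | cons y ys =>
      cases r with
      | zero => simp
      | succ r =>
        simp only [List.zipWith, List.set, List.getElem_cons_succ]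
        rw [ih ys r (by simpa using h1) (by simpa using h2) v]

lemma setCell_zipWith (b : List (List String)) (cs : List String) (col r : Nat) (v : String)
    (hr : r < b.length) (hc : cs.length = b.length) (hcol : col < (b[r]'hr).length) :
    setCell (List.zipWith (fun row w => row.set col w) b cs) r col v
      = List.zipWith (fun row w => row.set col w) b (cs.set r v) := by
  have hrc : r < cs.length := by omega
  have hrz : r < (List.zipWith (fun row w => row.set col w) b cs).length := by simp; omega
  have hget : (List.zipWith (fun row w => row.set col w) b cs).getD r []
      = (b[r]'hr).set col (cs[r]'hrc) := by
    have h := List.getElem_zipWith (f := fun (row : List String) (w : String) => row.set col w) (i := r) (h := hrz)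
    simp [List.getD, List.getElem?_eq_getElem hrz, h]
  unfold setCell
  rw [hget, List.set_set]
  exact zipWith_set_right _ b cs r hr (by omega) v

-- reading a cell of the partially rewritten board = reading the 1-D state
lemma read_zipWith (b : List (List String)) (cs : List String) (col k : Nat)
    (hk : k < b.length) (hc : cs.length = b.length) (hcol : col < (b[k]'hk).length) :
    (((List.zipWith (fun row w => row.set col w) b cs).getD k []).getD col "")
      = cs.getD k "" := by
  have hkc : k < cs.length := by omega
  have hkz : k < (List.zipWith (fun row w => row.set col w) b cs).length := by simp; omega
  have hget : (List.zipWith (fun row w => row.set col w) b cs).getD k []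
      = (b[k]'hk).set col (cs[k]'hkc) := by
    have h := List.getElem_zipWith (f := fun (row : List String) (w : String) => row.set col w) (i := k) (h := hkz)
    simp [List.getD, List.getElem?_eq_getElem hkz, h]
  rw [hget]
  simp [List.getD, List.getElem?_set_self hcol, List.getElem?_eq_getElem (show k < cs.length by omega)]

lemma zipWith_set_self (col : Nat) :
    ∀ (b : List (List String)), (∀ row ∈ b, col < row.length) →
    List.zipWith (fun row w => row.set col w) b (b.map (fun row => row.getD col "")) = b := by
  intro b
  induction b with
  | nil => intro _; rfl
  | cons x xs ih =>
    intro h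
    have hx : col < x.length := h x (by simp)
    simp only [List.map, List.zipWith]
    rw [ih (fun r hr => h r (by simp [hr]))]
    congr 1
    simp [List.getD, List.getElem?_eq_getElem hx, List.set_getElem_self]

-- lifting: A's 2-D inner loop on column `col` simulates the 1-D loop on that column
lemma lift (b : List (List String)) (col : Nat)
    (hcol : ∀ row ∈ b, col < row.length) :
    ∀ k, k ≤ b.length →
    (List.range k).foldl (stepA col) (0, b) =
      ((((List.range k).foldl stepA1 (0, b.map (fun row => row.getD col ""))).1),
       List.zipWith (fun row v => row.set col v) b
         ((List.range k).foldl stepA1 (0, b.map (fun row => row.getD col ""))).2) := by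
  intro k
  induction k with
  | zero =>
    intro _
    simp only [List.range_zero, List.foldl_nil]
    rw [zipWith_set_self col b hcol]
  | succ k ih =>
    intro hk
    have hklt : k < b.length := hk
    have ihe := ih (Nat.le_of_succ_le hk)
    set cs := ((List.range k).foldl stepA1 (0, b.map (fun row => row.getD col ""))).2 with hc
    set er := ((List.range k).foldl stepA1 (0, b.map (fun row => row.getD col ""))).1 with her
    have hclen : cs.length = b.length := by
      rw [hc, foldl_stepA1_length]; simp
    have hcolk : col < (b[k]'hklt).length := hcol _ (by simp)
    have hr2 : (List.range (k+1)).foldl (stepA col) (0, b)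
        = stepA col ((List.range k).foldl (stepA col) (0, b)) k := by
      rw [List.range_succ]; simp
    have hr1 : (List.range (k+1)).foldl stepA1 (0, b.map (fun row => row.getD col ""))
        = stepA1 (er, cs) k := by
      rw [List.range_succ, List.foldl_append]
      rfl
    rw [hr2, ihe, hr1]
    have hrd := read_zipWith b cs col k hklt hclen hcolk
    unfold stepA stepA1
    simp only []
    rw [hrd]
    by_cases h1 : cs.getD k "" = "#"
    · rw [if_pos h1, if_pos h1]
    · by_cases h2 : cs.getD k "" = "O"
      · rw [if_neg h1, if_neg h1, if_pos h2, if_pos h2]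
        by_cases h3 : er < k
        · rw [if_pos h3, if_pos h3]
          have herb : er < b.length := by omega
          have hcoler : col < (b[er]'herb).length := hcol _ (List.getElem_mem _)
          rw [setCell_zipWith b cs col er "O" herb hclen hcoler,
              setCell_zipWith b (cs.set er "O") col k "." hklt (by simp [hclen]) hcolk]
        · rw [if_neg h3, if_neg h3]
      · rw [if_neg h1, if_neg h1, if_neg h2, if_neg h2]

lemma col_eq (b : List (List String)) (col : Nat)
    (hcol : ∀ row ∈ b, col < row.length) :
    ((List.range b.length).foldl (stepA col) (0, b)).2 =
      List.zipWith (fun row v => row.set col v)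
        b (tilt_column (b.map (fun row => row.getD col ""))) := by
  have h := lift b col hcol b.length le_rfl
  have h2 := tilt_column_eq (b.map (fun row => row.getD col ""))
  simp only [List.length_map] at h2
  rw [h, h2]

lemma zipWith_set_map_length (col : Nat) :
    ∀ (b : List (List String)) (c : List String), c.length = b.length →
    (List.zipWith (fun row v => row.set col v) b c).map List.length = b.map List.length := by
  intro b
  induction b with
  | nil => intros; rfl
  | cons x xs ih =>
    intro c hc
    cases c with
    | nil => simp at hc
    | cons y ys => simp [ih ys (by simpa using hc)]

lemma foldl_eq_of_inv {α β : Type} (f g : β → α → β) (P : β → Prop) :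
    ∀ (l : List α) (b : β), P b → (∀ b a, a ∈ l → P b → f b a = g b a) →
    (∀ b a, a ∈ l → P b → P (g b a)) → l.foldl f b = l.foldl g b := by
  intro l
  induction l with
  | nil => intros; rfl
  | cons a t ih =>
    intro b hb hfg hP
    simp only [List.foldl]
    rw [hfg b a (by simp) hb]
    exact ih _ (hP b a (by simp) hb)
      (fun b' a' h' => hfg b' a' (by simp [h'])) (fun b' a' h' => hP b' a' (by simp [h']))

-- ===== VERDICT (by name: the statement is the Claim_ definition above) =====
theorem tilt_board_spec : Claim_equal_tilt_board := by
  intro board _ hpre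
  obtain ⟨hne, hlen⟩ := hpre
  unfold Spec_tilt_board tilt_board tilt_board_alt
  apply foldl_eq_of_inv _ _ (fun b => b.map List.length = board.map List.length)
  · rfl
  · intro b col hcolmem hP
    have hblen : b.length = board.length := by
      have h := congrArg List.length hP; simpa using h
    have hrows : ∀ row ∈ b, col < row.length := by
      intro row hrow
      have hcl : col < board.headI.length := List.mem_range.mp hcolmem
      obtain ⟨i, hi, hieq⟩ := List.mem_iff_getElem.mp hrow
      have hi1 : i < (b.map List.length).length := by simpa using hi
      have hib : i < board.length := by omega
      have h3 : (b.map List.length)[i]'hi1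
          = (board.map List.length)[i]'(by simpa using hib) :=
        List.getElem_of_eq hP hi1
      have h1 : (b.map List.length)[i]'hi1 = row.length := by
        simp [hieq]
      have h2 : (board.map List.length)[i]'(by simpa using hib)
          = (board[i]'hib).length := by simp
      have hmem : board[i]'hib ∈ board := List.getElem_mem _
      have hge := hlen _ hmem
      omega
    rw [← hblen]
    exact col_eq b col hrows
  · intro b col _ hP
    rw [← hP]
    exact zipWith_set_map_length col b _ (by rw [tilt_column_length]; simp)
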